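-- pv_equiv track=rewrite | github.com/Pengu1ne/ComputerSkills | Utility./create-cp2k-input.py | atom_electrons
-- ===== SOURCE A (Python) =====
-- def atom_electrons(x):
--     el = 0
--     for i in x:
--         if i=='H':
--             el += 1
--         elif i=='C':
--             el += 4
--         elif i=='N':
--             el += 5
--         elif i=='O':
--             el += 6
--         elif i=='S':
--             el += 6
--         elif i=='Cu':
--             el += 11
--         elif i=='Au':
--             el += 11
--     return el
-- ===== SOURCE B (Python) =====
-- TABLE = {'H': 1, 'C': 4, 'N': 5, 'O': 6, 'S': 6, 'Cu': 11, 'Au': 11}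
--
-- def atom_electrons(x):
--     freq = {}
--     for i in x:
--         freq[i] = freq.get(i, 0) + 1
--     return sum(c * TABLE.get(sym, 0) for sym, c in freq.items())
-- ===== Notes on version B (the rewrite author's own statement) =====
-- stated objective: alternative
-- what changed: B first builds a frequency table of the atom symbols in one pass and then returns the weighted sum count*TABLE.get(sym,0) over the distinct symbols, replacing A's per-atom if/elif accumulation with a lookup table and a two-phase tabulate-then-sum shape.
import Mathlib
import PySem

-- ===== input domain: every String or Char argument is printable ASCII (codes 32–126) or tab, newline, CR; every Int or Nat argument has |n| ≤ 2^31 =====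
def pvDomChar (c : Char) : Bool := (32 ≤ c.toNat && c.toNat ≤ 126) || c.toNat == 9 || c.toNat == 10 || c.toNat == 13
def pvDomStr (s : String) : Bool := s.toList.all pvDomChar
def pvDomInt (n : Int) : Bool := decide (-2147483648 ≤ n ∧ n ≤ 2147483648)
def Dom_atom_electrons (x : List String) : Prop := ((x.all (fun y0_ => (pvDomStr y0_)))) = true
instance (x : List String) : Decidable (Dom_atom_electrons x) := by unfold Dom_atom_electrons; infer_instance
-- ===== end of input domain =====

-- B replaces A's per-atom if/elif accumulation by a frequency table plus a weighted sum over distinct symbols (alternative decomposition, same cost).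

-- ===== PORT A =====
def atom_electrons (x : List String) : Int :=
  x.foldl (fun el i =>
    if i = "H" then el + 1
    else if i = "C" then el + 4
    else if i = "N" then el + 5
    else if i = "O" then el + 6
    else if i = "S" then el + 6
    else if i = "Cu" then el + 11
    else if i = "Au" then el + 11
    else el) 0

-- ===== PORT B =====
def pvTable : PySem.Dict String Int :=
  PySem.Dict.ofList [("H", 1), ("C", 4), ("N", 5), ("O", 6), ("S", 6), ("Cu", 11), ("Au", 11)]

def atom_electrons_alt (x : List String) : Int :=
  let freq := x.foldl (fun d i => d.insert i (d.getD i 0 + 1)) PySem.Dict.empty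
  (freq.items.map (fun p => p.2 * pvTable.getD p.1 0)).sum

-- ===== PRECONDITION & SPEC =====
def Spec_atom_electrons (x : List String) (out : Int) : Prop := out = atom_electrons_alt x
instance (x : List String) (out : Int) : Decidable (Spec_atom_electrons x out) := by unfold Spec_atom_electrons; infer_instance

-- ===== CLAIM (what is proved, stated in full; the proofs are below) =====
def Claim_equal_atom_electrons : Prop := ∀ (x : List String), Dom_atom_electrons x → Spec_atom_electrons x (atom_electrons x)

-- ===== LEMMAS AND PROOFS =====

-- the per-symbol value A adds, as a function
def pvVal (i : String) : Int :=
  if i = "H" then 1 else if i = "C" then 4 else if i = "N" then 5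
  else if i = "O" then 6 else if i = "S" then 6 else if i = "Cu" then 11
  else if i = "Au" then 11 else 0

theorem pvTable_getD (i : String) : pvTable.getD i 0 = pvVal i := by
  have h : pvTable = PySem.Dict.mk [("H", 1), ("C", 4), ("N", 5), ("O", 6), ("S", 6), ("Cu", 11), ("Au", 11)] := by decide
  rcases eq_or_ne i "H" with rfl | h1; · decide
  rcases eq_or_ne i "C" with rfl | h2; · decide
  rcases eq_or_ne i "N" with rfl | h3; · decide
  rcases eq_or_ne i "O" with rfl | h4; · decide
  rcases eq_or_ne i "S" with rfl | h5; · decide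
  rcases eq_or_ne i "Cu" with rfl | h6; · decide
  rcases eq_or_ne i "Au" with rfl | h7; · decide
  rw [h]
  simp [PySem.Dict.getD, PySem.Dict.get?, pvVal,
    h1, h2, h3, h4, h5, h6, h7,
    Ne.symm h1, Ne.symm h2, Ne.symm h3, Ne.symm h4, Ne.symm h5, Ne.symm h6, Ne.symm h7]

theorem atom_electrons_eq_sum (x : List String) :
    atom_electrons x = (x.map pvVal).sum := by
  unfold atom_electrons
  have h : (fun (el : Int) (i : String) =>
      if i = "H" then el + 1
      else if i = "C" then el + 4
      else if i = "N" then el + 5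
      else if i = "O" then el + 6
      else if i = "S" then el + 6
      else if i = "Cu" then el + 11
      else if i = "Au" then el + 11
      else el) = (fun el i => el + pvVal i) := by
    funext el i
    simp only [pvVal]
    split_ifs <;> ring
  rw [h, PySem.List.foldl_add]
  ring

theorem sum_dedup_count (g : String → Int) (x : List String) :
    ((PySem.Set.ofList x).map (fun k => (x.count k : Int) * g k)).sum = (x.map g).sum := by
  rw [← PySem.List.dedup_eq_ofList]
  have hn : (PySem.List.dedup x).Nodup := PySem.List.nodup_dedup x
  have htf : (PySem.List.dedup x).toFinset = x.toFinset := by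
    ext a
    simp [List.mem_toFinset]
  rw [← List.sum_toFinset _ hn, htf, Finset.sum_list_map_count]
  refine Finset.sum_congr rfl (fun m _ => ?_)
  rw [nsmul_eq_mul]

theorem alt_eq_sum (x : List String) :
    atom_electrons_alt x = (x.map pvVal).sum := by
  unfold atom_electrons_alt
  rw [PySem.Dict.foldl_insert_getD_add_one_eq_counter]
  show ((PySem.Dict.counter x).items.map (fun p => p.2 * pvTable.getD p.1 0)).sum = (x.map pvVal).sum
  rw [PySem.Dict.items_counter, List.map_map]
  have h : ((fun p : String × Int => p.2 * pvTable.getD p.1 0) ∘ fun k => (k, (x.count k : Int)))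
      = fun k => (x.count k : Int) * pvVal k := by
    funext k
    simp [Function.comp, pvTable_getD]
  rw [h, sum_dedup_count]

-- ===== VERDICT (by name: the statement is the Claim_ definition above) =====
theorem atom_electrons_spec : Claim_equal_atom_electrons := by
  intro x _
  unfold Spec_atom_electrons
  rw [atom_electrons_eq_sum, alt_eq_sum]
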